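-- pv_equiv track=rewrite | github.com/Fintama/review-agent-action | scripts/post-review.py | find_closest_commentable_line
-- ===== SOURCE A (Python) =====
-- def find_closest_commentable_line(
--     commentable_lines: set[int], target_line: int,
-- ) -> int | None:
--     """Find the closest line in the diff that we can comment on."""
--     if not commentable_lines:
--         return None
--     if target_line in commentable_lines:
--         return target_line
--     for offset in range(1, 6):
--         if (target_line + offset) in commentable_lines:
--             return target_line + offset
--         if (target_line - offset) in commentable_lines:
--             return target_line - offset
--     return None
-- ===== SOURCE B (Python) =====
-- def find_closest_commentable_line(
--     commentable_lines, target_line,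
-- ):
--     """Find the closest line in the diff that we can comment on."""
--     best = None
--     for line in commentable_lines:
--         d = abs(line - target_line)
--         if d <= 5:
--             if best is None or (d, -line) < (abs(best - target_line), -best):
--                 best = line
--     return best
-- ===== Notes on version B (the rewrite author's own statement) =====
-- stated objective: simpler
-- what changed: Replaces the 11 outward membership probes (target, then target+-offset for offset 1..5) with a single pass over the set keeping the best candidate under the key (abs(line-target), -line), which encodes A's closest-first, plus-before-minus rule.
import Mathlib
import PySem

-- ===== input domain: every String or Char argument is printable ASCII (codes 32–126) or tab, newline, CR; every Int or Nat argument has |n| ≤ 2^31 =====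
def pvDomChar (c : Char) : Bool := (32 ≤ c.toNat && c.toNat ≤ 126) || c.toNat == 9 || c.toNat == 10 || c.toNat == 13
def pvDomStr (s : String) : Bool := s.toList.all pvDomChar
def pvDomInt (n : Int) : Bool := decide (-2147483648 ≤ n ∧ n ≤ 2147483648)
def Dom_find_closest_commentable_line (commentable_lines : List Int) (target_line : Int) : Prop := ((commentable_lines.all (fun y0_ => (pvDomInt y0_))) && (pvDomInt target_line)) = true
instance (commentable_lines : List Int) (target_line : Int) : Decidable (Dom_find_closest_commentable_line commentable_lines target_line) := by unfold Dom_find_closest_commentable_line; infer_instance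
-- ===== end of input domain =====

-- B replaces A's outward offset probing with a single scan keeping the best
-- in-window candidate under the key (|line - target|, -line); return values proved equal.

-- ===== PORT A =====
-- the 'for offset in range(1, 6)' loop of A, recursing over the offset list
def pvGoA (l : List Int) (t : Int) : List Int → Option Int
  | [] => none
  | o :: rest =>
    if t + o ∈ l then some (t + o)
    else if t - o ∈ l then some (t - o)
    else pvGoA l t rest

def find_closest_commentable_line (commentable_lines : List Int) (target_line : Int) : Option Int :=
  if commentable_lines = [] then none
  else if target_line ∈ commentable_lines then some target_line
  else pvGoA commentable_lines target_line (PySem.List.pyRange 1 6 1)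

-- ===== PORT B =====
-- one step of B's loop: keep `best` or replace it by `x` when (d, -x) is a smaller key
def pvStepB (t : Int) (best : Option Int) (x : Int) : Option Int :=
  let d := |x - t|
  if d ≤ 5 then
    match best with
    | none => some x
    | some b => if d < |b - t| ∨ (d = |b - t| ∧ -x < -b) then some x else some b
  else best

def find_closest_commentable_line_alt (commentable_lines : List Int) (target_line : Int) : Option Int :=
  commentable_lines.foldl (pvStepB target_line) none

-- ===== PRECONDITION & SPEC =====
def Spec_find_closest_commentable_line (commentable_lines : List Int) (target_line : Int) (out : Option Int) : Prop := out = find_closest_commentable_line_alt commentable_lines target_line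
instance (commentable_lines : List Int) (target_line : Int) (out : Option Int) : Decidable (Spec_find_closest_commentable_line commentable_lines target_line out) := by unfold Spec_find_closest_commentable_line; infer_instance

-- ===== CLAIM (what is proved, stated in full; the proofs are below) =====
def Claim_equal_find_closest_commentable_line : Prop := ∀ (commentable_lines : List Int) (target_line : Int), Dom_find_closest_commentable_line commentable_lines target_line → Spec_find_closest_commentable_line commentable_lines target_line (find_closest_commentable_line commentable_lines target_line)

-- ===== LEMMAS AND PROOFS =====

-- one step of B either keeps a `none`/out-of-window state or returns the better of acc and x
theorem pvStep_none (t x : Int) (a : Option Int) (h : pvStepB t a x = none) :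
    a = none ∧ ¬ |x - t| ≤ 5 := by
  simp only [pvStepB] at h
  by_cases hw : |x - t| ≤ 5
  · rw [if_pos hw] at h
    cases a with
    | none => cases h
    | some b => dsimp only at h; split_ifs at h
  · rw [if_neg hw] at h
    exact ⟨h, hw⟩

theorem pvStep_char (t x : Int) (a : Option Int) (c : Int) (hc : pvStepB t a x = some c) :
    ((c = x ∧ |x - t| ≤ 5) ∨ a = some c) ∧
    (|x - t| ≤ 5 → |c - t| < |x - t| ∨ (|c - t| = |x - t| ∧ x ≤ c)) ∧
    (∀ a0, a = some a0 → |c - t| < |a0 - t| ∨ (|c - t| = |a0 - t| ∧ a0 ≤ c)) := by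
  simp only [pvStepB] at hc
  by_cases hw : |x - t| ≤ 5
  · rw [if_pos hw] at hc
    cases a with
    | none =>
      obtain rfl : x = c := Option.some.inj hc
      exact ⟨Or.inl ⟨rfl, hw⟩, fun _ => Or.inr ⟨rfl, le_refl _⟩, fun a0 h0 => by cases h0⟩
    | some b =>
      dsimp only at hc
      split_ifs at hc with hbet
      · obtain rfl : x = c := Option.some.inj hc
        exact ⟨Or.inl ⟨rfl, hw⟩, fun _ => Or.inr ⟨rfl, le_refl _⟩,
          fun a0 h0 => by obtain rfl : b = a0 := Option.some.inj h0; omega⟩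
      · obtain rfl : b = c := Option.some.inj hc
        exact ⟨Or.inr rfl, fun _ => by omega,
          fun a0 h0 => by obtain rfl : b = a0 := Option.some.inj h0; omega⟩
  · rw [if_neg hw] at hc
    exact ⟨Or.inr hc, fun h => absurd h hw,
      fun a0 h0 => by rw [h0] at hc; obtain rfl : a0 = c := Option.some.inj hc; omega⟩

-- characterization of B's fold: a `none` result means no in-window element (and a `none`
-- start); a `some b` result is the start or an in-window element of the list, is key-minimal
-- among the in-window elements, and is at least as good as the start.
theorem pvFoldB_char (t : Int) (l : List Int) (a : Option Int)
    (ha : ∀ a0, a = some a0 → |a0 - t| ≤ 5) :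
    (l.foldl (pvStepB t) a = none → (a = none ∧ ∀ x ∈ l, ¬ |x - t| ≤ 5)) ∧
    (∀ b, l.foldl (pvStepB t) a = some b →
      ((b ∈ l ∧ |b - t| ≤ 5) ∨ a = some b) ∧
      (∀ x ∈ l, |x - t| ≤ 5 → |b - t| < |x - t| ∨ (|b - t| = |x - t| ∧ x ≤ b)) ∧
      (∀ a0, a = some a0 → |b - t| < |a0 - t| ∨ (|b - t| = |a0 - t| ∧ a0 ≤ b))) := by
  induction l generalizing a with
  | nil =>
    refine ⟨fun h => ⟨h, by simp⟩, fun b hb => ?_⟩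
    simp only [List.foldl_nil] at hb
    refine ⟨Or.inr hb, by simp, fun a0 ha0 => ?_⟩
    rw [hb] at ha0
    obtain rfl : b = a0 := Option.some.inj ha0
    omega
  | cons x rest ih =>
    have ha' : ∀ a0, pvStepB t a x = some a0 → |a0 - t| ≤ 5 := by
      intro a0 h0
      rcases (pvStep_char t x a a0 h0).1 with ⟨rfl, hw⟩ | h
      · exact hw
      · exact ha a0 h
    obtain ⟨ihn, ihs⟩ := ih (pvStepB t a x) ha'
    constructor
    · intro h
      simp only [List.foldl_cons] at h
      obtain ⟨h1, h2⟩ := ihn h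
      obtain ⟨hanone, hxw⟩ := pvStep_none t x a h1
      refine ⟨hanone, fun y hy => ?_⟩
      rcases List.mem_cons.mp hy with heq | hy
      · exact heq ▸ hxw
      · exact h2 y hy
    · intro b hb
      simp only [List.foldl_cons] at hb
      obtain ⟨hmem, hmin, hrel⟩ := ihs b hb
      refine ⟨?_, ?_, ?_⟩
      · rcases hmem with ⟨hbm, hbw⟩ | heq
        · exact Or.inl ⟨List.mem_cons_of_mem _ hbm, hbw⟩
        · rcases (pvStep_char t x a b heq).1 with ⟨rfl, hw⟩ | h
          · exact Or.inl ⟨List.mem_cons_self, hw⟩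
          · exact Or.inr h
      · intro y hy hyw
        rcases List.mem_cons.mp hy with heq | hy
        · subst heq
          cases hc : pvStepB t a y with
          | none => exact absurd hyw (pvStep_none t y a hc).2
          | some c =>
            have h1 := (pvStep_char t y a c hc).2.1 hyw
            have h2 := hrel c hc
            omega
        · exact hmin y hy hyw
      · intro a0 ha0
        cases hc : pvStepB t a x with
        | none => rw [(pvStep_none t x a hc).1] at ha0; cases ha0
        | some c =>
          have h1 := (pvStep_char t x a c hc).2.2 a0 ha0
          have h2 := hrel c hc
          omega

-- B returns the stated key-minimal in-window element
theorem pvFoldB_eq_some (t : Int) (l : List Int) (r : Int)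
    (hr : r ∈ l) (hw : |r - t| ≤ 5)
    (hmin : ∀ x ∈ l, |x - t| ≤ 5 → |r - t| < |x - t| ∨ (|r - t| = |x - t| ∧ x ≤ r)) :
    l.foldl (pvStepB t) none = some r := by
  obtain ⟨hn, hs⟩ := pvFoldB_char t l none (by simp)
  cases h : l.foldl (pvStepB t) none with
  | none => exact absurd hw ((hn h).2 r hr)
  | some b =>
    obtain ⟨hmem, hbmin, _⟩ := hs b h
    rcases hmem with ⟨hbm, hbw⟩ | heq
    · have h1 := hbmin r hr hw
      have h2 := hmin b hbm hbw
      have : b = r := by omega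
      rw [this]
    · cases heq

-- B returns none when no element is within the window
theorem pvFoldB_eq_none (t : Int) (l : List Int)
    (h : ∀ x ∈ l, ¬ |x - t| ≤ 5) :
    l.foldl (pvStepB t) none = none := by
  obtain ⟨_, hs⟩ := pvFoldB_char t l none (by simp)
  cases hh : l.foldl (pvStepB t) none with
  | none => rfl
  | some b =>
    obtain ⟨hmem, _, _⟩ := hs b hh
    rcases hmem with ⟨hbm, hbw⟩ | heq
    · exact absurd hbw (h b hbm)
    · cases heq

-- ===== VERDICT (by name: the statement is the Claim_ definition above) =====
set_option maxHeartbeats 2000000 in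
theorem find_closest_commentable_line_spec : Claim_equal_find_closest_commentable_line := by
  intro l t _
  unfold Spec_find_closest_commentable_line find_closest_commentable_line
    find_closest_commentable_line_alt
  have hrange : PySem.List.pyRange 1 6 1 = [1,2,3,4,5] := by decide
  rw [hrange]
  simp only [pvGoA]
  split_ifs with hnil m0 p1 m1 p2 m2 p3 m3 p4 m4 p5 m5
  · subst hnil; rfl
  · refine (pvFoldB_eq_some t l (t) m0 ?_ ?_).symm
    · simp only [Int.abs_eq_natAbs]; omega
    · intro x hx hxw
      simp only [Int.abs_eq_natAbs] at hxw ⊢; omega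
  · refine (pvFoldB_eq_some t l (t+1) p1 ?_ ?_).symm
    · simp only [Int.abs_eq_natAbs]; omega
    · intro x hx hxw
      have e0 : x ≠ (t) := fun e => m0 (e ▸ hx)
      simp only [Int.abs_eq_natAbs] at hxw ⊢; omega
  · refine (pvFoldB_eq_some t l (t-1) m1 ?_ ?_).symm
    · simp only [Int.abs_eq_natAbs]; omega
    · intro x hx hxw
      have e0 : x ≠ (t) := fun e => m0 (e ▸ hx)
      have e1 : x ≠ (t+1) := fun e => p1 (e ▸ hx)
      simp only [Int.abs_eq_natAbs] at hxw ⊢; omega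
  · refine (pvFoldB_eq_some t l (t+2) p2 ?_ ?_).symm
    · simp only [Int.abs_eq_natAbs]; omega
    · intro x hx hxw
      have e0 : x ≠ (t) := fun e => m0 (e ▸ hx)
      have e1 : x ≠ (t+1) := fun e => p1 (e ▸ hx)
      have e2 : x ≠ (t-1) := fun e => m1 (e ▸ hx)
      simp only [Int.abs_eq_natAbs] at hxw ⊢; omega
  · refine (pvFoldB_eq_some t l (t-2) m2 ?_ ?_).symm
    · simp only [Int.abs_eq_natAbs]; omega
    · intro x hx hxw
      have e0 : x ≠ (t) := fun e => m0 (e ▸ hx)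
      have e1 : x ≠ (t+1) := fun e => p1 (e ▸ hx)
      have e2 : x ≠ (t-1) := fun e => m1 (e ▸ hx)
      have e3 : x ≠ (t+2) := fun e => p2 (e ▸ hx)
      simp only [Int.abs_eq_natAbs] at hxw ⊢; omega
  · refine (pvFoldB_eq_some t l (t+3) p3 ?_ ?_).symm
    · simp only [Int.abs_eq_natAbs]; omega
    · intro x hx hxw
      have e0 : x ≠ (t) := fun e => m0 (e ▸ hx)
      have e1 : x ≠ (t+1) := fun e => p1 (e ▸ hx)
      have e2 : x ≠ (t-1) := fun e => m1 (e ▸ hx)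
      have e3 : x ≠ (t+2) := fun e => p2 (e ▸ hx)
      have e4 : x ≠ (t-2) := fun e => m2 (e ▸ hx)
      simp only [Int.abs_eq_natAbs] at hxw ⊢; omega
  · refine (pvFoldB_eq_some t l (t-3) m3 ?_ ?_).symm
    · simp only [Int.abs_eq_natAbs]; omega
    · intro x hx hxw
      have e0 : x ≠ (t) := fun e => m0 (e ▸ hx)
      have e1 : x ≠ (t+1) := fun e => p1 (e ▸ hx)
      have e2 : x ≠ (t-1) := fun e => m1 (e ▸ hx)
      have e3 : x ≠ (t+2) := fun e => p2 (e ▸ hx)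
      have e4 : x ≠ (t-2) := fun e => m2 (e ▸ hx)
      have e5 : x ≠ (t+3) := fun e => p3 (e ▸ hx)
      simp only [Int.abs_eq_natAbs] at hxw ⊢; omega
  · refine (pvFoldB_eq_some t l (t+4) p4 ?_ ?_).symm
    · simp only [Int.abs_eq_natAbs]; omega
    · intro x hx hxw
      have e0 : x ≠ (t) := fun e => m0 (e ▸ hx)
      have e1 : x ≠ (t+1) := fun e => p1 (e ▸ hx)
      have e2 : x ≠ (t-1) := fun e => m1 (e ▸ hx)
      have e3 : x ≠ (t+2) := fun e => p2 (e ▸ hx)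
      have e4 : x ≠ (t-2) := fun e => m2 (e ▸ hx)
      have e5 : x ≠ (t+3) := fun e => p3 (e ▸ hx)
      have e6 : x ≠ (t-3) := fun e => m3 (e ▸ hx)
      simp only [Int.abs_eq_natAbs] at hxw ⊢; omega
  · refine (pvFoldB_eq_some t l (t-4) m4 ?_ ?_).symm
    · simp only [Int.abs_eq_natAbs]; omega
    · intro x hx hxw
      have e0 : x ≠ (t) := fun e => m0 (e ▸ hx)
      have e1 : x ≠ (t+1) := fun e => p1 (e ▸ hx)
      have e2 : x ≠ (t-1) := fun e => m1 (e ▸ hx)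
      have e3 : x ≠ (t+2) := fun e => p2 (e ▸ hx)
      have e4 : x ≠ (t-2) := fun e => m2 (e ▸ hx)
      have e5 : x ≠ (t+3) := fun e => p3 (e ▸ hx)
      have e6 : x ≠ (t-3) := fun e => m3 (e ▸ hx)
      have e7 : x ≠ (t+4) := fun e => p4 (e ▸ hx)
      simp only [Int.abs_eq_natAbs] at hxw ⊢; omega
  · refine (pvFoldB_eq_some t l (t+5) p5 ?_ ?_).symm
    · simp only [Int.abs_eq_natAbs]; omega
    · intro x hx hxw
      have e0 : x ≠ (t) := fun e => m0 (e ▸ hx)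
      have e1 : x ≠ (t+1) := fun e => p1 (e ▸ hx)
      have e2 : x ≠ (t-1) := fun e => m1 (e ▸ hx)
      have e3 : x ≠ (t+2) := fun e => p2 (e ▸ hx)
      have e4 : x ≠ (t-2) := fun e => m2 (e ▸ hx)
      have e5 : x ≠ (t+3) := fun e => p3 (e ▸ hx)
      have e6 : x ≠ (t-3) := fun e => m3 (e ▸ hx)
      have e7 : x ≠ (t+4) := fun e => p4 (e ▸ hx)
      have e8 : x ≠ (t-4) := fun e => m4 (e ▸ hx)
      simp only [Int.abs_eq_natAbs] at hxw ⊢; omega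
  · refine (pvFoldB_eq_some t l (t-5) m5 ?_ ?_).symm
    · simp only [Int.abs_eq_natAbs]; omega
    · intro x hx hxw
      have e0 : x ≠ (t) := fun e => m0 (e ▸ hx)
      have e1 : x ≠ (t+1) := fun e => p1 (e ▸ hx)
      have e2 : x ≠ (t-1) := fun e => m1 (e ▸ hx)
      have e3 : x ≠ (t+2) := fun e => p2 (e ▸ hx)
      have e4 : x ≠ (t-2) := fun e => m2 (e ▸ hx)
      have e5 : x ≠ (t+3) := fun e => p3 (e ▸ hx)
      have e6 : x ≠ (t-3) := fun e => m3 (e ▸ hx)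
      have e7 : x ≠ (t+4) := fun e => p4 (e ▸ hx)
      have e8 : x ≠ (t-4) := fun e => m4 (e ▸ hx)
      have e9 : x ≠ (t+5) := fun e => p5 (e ▸ hx)
      simp only [Int.abs_eq_natAbs] at hxw ⊢; omega
  · -- nothing within 5 of t is in l
    refine (pvFoldB_eq_none t l ?_).symm
    intro x hx hxw
    have e0 : x ≠ t := fun e => m0 (e ▸ hx)
    have f1 : x ≠ (t+1) := fun e => p1 (e ▸ hx)
    have f2 : x ≠ (t-1) := fun e => m1 (e ▸ hx)
    have f3 : x ≠ (t+2) := fun e => p2 (e ▸ hx)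
    have f4 : x ≠ (t-2) := fun e => m2 (e ▸ hx)
    have f5 : x ≠ (t+3) := fun e => p3 (e ▸ hx)
    have f6 : x ≠ (t-3) := fun e => m3 (e ▸ hx)
    have f7 : x ≠ (t+4) := fun e => p4 (e ▸ hx)
    have f8 : x ≠ (t-4) := fun e => m4 (e ▸ hx)
    have f9 : x ≠ (t+5) := fun e => p5 (e ▸ hx)
    have f10 : x ≠ (t-5) := fun e => m5 (e ▸ hx)
    simp only [Int.abs_eq_natAbs] at hxw; omega
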